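-- pv_equiv track=rewrite | github.com/csears/Multicorn | multicorn/corns/filesystem.py | _tokenize_pattern
-- ===== SOURCE A (Python) =====
-- def _tokenize_pattern(pattern):
--     # We could re-purpose the parser for str.format() and use string.Formatter,
--     # but we do not want to parse conversions and format specs.
--     in_field = False
--     field_name = None
--     char_list = list(pattern)
--     for prev_char, char, next_char in zip(
--             [None] + char_list[:-1],
--             char_list,
--             char_list[1:] + [None]):
--         if in_field:
--             if char == '}':
--                 yield 'property', field_name
--                 field_name = None
--                 in_field = False
--             else:
--                 field_name += char
--         else:
--             if char == '/':
--                 yield 'path separator', char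
--             elif char in '{}' and next_char == char:
--                 # Two brakets are parsed as one. Ignore the first one.
--                 pass
--             elif char == '}' and prev_char != char:
--                 raise ValueError("Single '}' encountered in format string")
--             elif char == '{' and prev_char != char:
--                 in_field = True
--                 field_name = ''
--             else:
--                 # Includes normal chars but also an escaped bracket.
--                 yield 'literal', char
--     if in_field:
--         raise ValueError("Unmatched '{' in format string")
--
--     # Artificially add this token to simplify the parser below
--     yield 'path separator', '/'
-- ===== SOURCE B (Python) =====
-- def _tokenize_pattern(pattern):
--     # Index-based scanner: consumes maximal brace runs and whole fields at once
--     # instead of stepping one character with prev/next peeks.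
--     i = 0
--     n = len(pattern)
--     while i < n:
--         c = pattern[i]
--         if c == '{' or c == '}':
--             j = i
--             while j < n and pattern[j] == c:
--                 j += 1
--             run = j - i
--             if run >= 2:
--                 # a run of identical braces collapses to one literal brace
--                 yield 'literal', c
--                 i = j
--             elif c == '{':
--                 end = pattern.find('}', i + 1)
--                 if end == -1:
--                     raise ValueError("Unmatched '{' in format string")
--                 yield 'property', pattern[i + 1:end]
--                 i = end + 1
--             else:
--                 # a lone '}' is a literal only right after a closing '}'
--                 if i > 0 and pattern[i - 1] == '}':
--                     yield 'literal', c
--                     i += 1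
--                 else:
--                     raise ValueError("Single '}' encountered in format string")
--         elif c == '/':
--             yield 'path separator', c
--             i += 1
--         else:
--             yield 'literal', c
--             i += 1
--     yield 'path separator', '/'
-- ===== Notes on version B (the rewrite author's own statement) =====
-- stated objective: alternative
-- what changed: Replaced the per-character prev/next-peeking state machine (a zip of shifted lists with in_field/field_name flags) by an index-cursor scanner that consumes a maximal run of identical braces in one step and a whole {field} in one step via str.find.
-- outside the precondition, e.g. on _tokenize_pattern('}'): A raises ValueError, B raises ValueError; on _tokenize_pattern('{'): A raises ValueError, B raises ValueError
import Mathlib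
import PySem

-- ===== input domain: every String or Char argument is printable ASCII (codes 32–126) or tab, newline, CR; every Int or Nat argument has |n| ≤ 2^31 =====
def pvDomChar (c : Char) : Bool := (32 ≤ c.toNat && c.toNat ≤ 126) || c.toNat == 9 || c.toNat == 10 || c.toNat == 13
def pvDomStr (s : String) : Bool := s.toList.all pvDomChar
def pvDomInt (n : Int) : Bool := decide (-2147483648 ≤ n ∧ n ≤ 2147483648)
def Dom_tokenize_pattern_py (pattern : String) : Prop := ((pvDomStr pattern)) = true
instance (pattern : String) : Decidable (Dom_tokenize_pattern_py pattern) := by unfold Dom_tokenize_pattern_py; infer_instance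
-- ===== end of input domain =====

-- B replaces A's per-character prev/next-peeking state machine (a zip of shifted lists) by an
-- index-cursor scanner that consumes a maximal brace run and a whole {field} in one step
-- (alternative decomposition, same O(n) cost); equivalence is about the returned token list.


-- ===== PORT A =====
-- A's for-loop over zip([None] + cl[:-1], cl, cl[1:] + [None]); field_name : Option String
-- (None in Python; only read while in_field, when it is some _). Where Python raises
-- ValueError the generator yields no list; those inputs are outside Pre_ below and the port
-- simply stops there.
def pvLoopA : Bool → Option String → List (Option Char × Char × Option Char) → List (String × String)
  | in_field, _, [] =>
      if in_field then []   -- raise ValueError("Unmatched '{' in format string")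
      else [("path separator", "/")]
  | in_field, field_name, (prev_char, char, next_char) :: rest =>
      if in_field then
        if char = '}' then ("property", field_name.getD "") :: pvLoopA false none rest
        else pvLoopA true (some ((field_name.getD "").push char)) rest
      else
        if char = '/' then ("path separator", char.toString) :: pvLoopA false field_name rest
        else if (char = '{' ∨ char = '}') ∧ next_char = some char then pvLoopA false field_name rest
        else if char = '}' ∧ prev_char ≠ some char then []   -- raise ValueError("Single '}' encountered in format string")
        else if char = '{' ∧ prev_char ≠ some char then pvLoopA true (some "") rest
        else ("literal", char.toString) :: pvLoopA false field_name rest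

def tokenize_pattern_py (pattern : String) : List (String × String) :=
  let char_list := pattern.toList
  pvLoopA false none
    (List.zip (none :: char_list.dropLast.map some)
      (List.zip char_list ((char_list.drop 1).map some ++ [none])))

-- ===== PORT B =====
-- Source B's while loop over a cursor i; the inner run-counting while loop is the takeWhile
-- length (j - i); pattern.find('}', i + 1) is ported by hand as findIdx? on the dropped
-- suffix (exact here: first '}' at index ≥ i+1, none = -1); pattern[i+1:end] is the take.
def pvLoopB (s : List Char) (i : Nat) : List (String × String) :=
  if hi : i < s.length then
    let c := s[i]
    if c = '{' ∨ c = '}' then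
      if hrun : 2 ≤ ((s.drop i).takeWhile (fun d => d = c)).length then
        ("literal", c.toString) :: pvLoopB s (i + ((s.drop i).takeWhile (fun d => d = c)).length)
      else if c = '{' then
        match (s.drop (i+1)).findIdx? (fun d => d = '}') with
        | none => []   -- raise ValueError("Unmatched '{' in format string")
        | some k => ("property", String.ofList ((s.drop (i+1)).take k)) :: pvLoopB s (i + 1 + k + 1)
      else
        if 0 < i ∧ s[i-1]? = some '}' then ("literal", c.toString) :: pvLoopB s (i+1)
        else []   -- raise ValueError("Single '}' encountered in format string")
    else if c = '/' then ("path separator", c.toString) :: pvLoopB s (i+1)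
    else ("literal", c.toString) :: pvLoopB s (i+1)
  else [("path separator", "/")]
termination_by s.length - i
decreasing_by all_goals first
  | omega
  | (have h2 : 2 ≤ (List.takeWhile (fun d => decide (d = s[i])) (s.drop i)).length := hrun; omega)

def tokenize_pattern_py_alt (pattern : String) : List (String × String) :=
  pvLoopB pattern.toList 0

-- ===== PRECONDITION & SPEC =====
-- Validity automaton for Pre_: one structural pass, with states
-- top pj (ordinary position; pj = previous char was a '}'), openRun/closeRun (inside a
-- brace run of length ≥ 2), field (inside {…}).
inductive PvScanSt : Type
  | top : Bool → PvScanSt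
  | openRun : PvScanSt
  | closeRun : PvScanSt
  | field : PvScanSt

def pvPreScan : PvScanSt → List Char → Bool
  | .field, [] => false
  | _, [] => true
  | .field, c :: cs => if c = '}' then pvPreScan (.top true) cs else pvPreScan .field cs
  | .openRun, _ :: cs => if cs.head? = some '{' then pvPreScan .openRun cs else pvPreScan (.top false) cs
  | .closeRun, _ :: cs => if cs.head? = some '}' then pvPreScan .closeRun cs else pvPreScan (.top true) cs
  | .top pj, c :: cs =>
    if c = '{' then
      if cs.head? = some '{' then pvPreScan .openRun cs else pvPreScan .field cs
    else if c = '}' then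
      if cs.head? = some '}' then pvPreScan .closeRun cs
      else if pj then pvPreScan (.top true) cs
      else false
    else pvPreScan (.top false) cs

-- Pre_ excludes exactly the patterns on which Python A raises ValueError (a lone '}' not
-- preceded by a '}', or an unmatched '{'); the two ports happen to agree even there, so the
-- equality proof below holds without the hypothesis — Pre_'s role is that A returns no
-- value outside it.
def Pre_tokenize_pattern_py (pattern : String) : Prop :=
  pvPreScan (.top false) pattern.toList = true

instance (pattern : String) : Decidable (Pre_tokenize_pattern_py pattern) := by
  unfold Pre_tokenize_pattern_py; infer_instance

def pvWitness_tokenize_pattern_py : String := "a/{x}}/{{b}}.txt"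

def Spec_tokenize_pattern_py (pattern : String) (out : List (String × String)) : Prop :=
  out = tokenize_pattern_py_alt pattern
instance (pattern : String) (out : List (String × String)) : Decidable (Spec_tokenize_pattern_py pattern out) := by
  unfold Spec_tokenize_pattern_py; infer_instance

-- ===== CLAIM (what is proved, stated in full; the proofs are below) =====
def Claim_equal_tokenize_pattern_py : Prop := ∀ (pattern : String), Dom_tokenize_pattern_py pattern → Pre_tokenize_pattern_py pattern → Spec_tokenize_pattern_py pattern (tokenize_pattern_py pattern)

-- ===== LEMMAS AND PROOFS =====

-- A's loop re-stated on a suffix with the previous character carried as a parameter.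
def pvRunA : Option Char → Bool → Option String → List Char → List (String × String)
  | _, in_field, _, [] => if in_field then [] else [("path separator", "/")]
  | p, in_field, fn, c :: rest =>
    if in_field then
      if c = '}' then ("property", fn.getD "") :: pvRunA (some c) false none rest
      else pvRunA (some c) true (some ((fn.getD "").push c)) rest
    else
      if c = '/' then ("path separator", c.toString) :: pvRunA (some c) false fn rest
      else if (c = '{' ∨ c = '}') ∧ rest.head? = some c then pvRunA (some c) false fn rest
      else if c = '}' ∧ p ≠ some c then []
      else if c = '{' ∧ p ≠ some c then pvRunA (some c) true (some "") rest
      else ("literal", c.toString) :: pvRunA (some c) false fn rest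

-- the triple list A's zip builds, parametrised by the previous character
def pvTriples (p : Option Char) (l : List Char) : List (Option Char × Char × Option Char) :=
  List.zip (p :: l.dropLast.map some) (List.zip l ((l.drop 1).map some ++ [none]))

theorem pvTriples_cons (p : Option Char) (c : Char) (l : List Char) :
    pvTriples p (c :: l) = (p, c, l.head?) :: pvTriples (some c) l := by
  cases l <;> simp [pvTriples]

theorem pvLoopA_eq_runA (l : List Char) : ∀ (p : Option Char) (b : Bool) (fn : Option String),
    pvLoopA b fn (pvTriples p l) = pvRunA p b fn l := by
  induction l with
  | nil => intro p b fn; simp [pvTriples, pvLoopA, pvRunA]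
  | cons c rest IH =>
    intro p b fn
    rw [pvTriples_cons]
    simp only [pvLoopA, pvRunA]
    split_ifs <;> first | rfl | rw [IH]

theorem pvRunA_field (a : List Char) : ∀ (p : Option Char) (fn : String) (rest : List Char),
    '}' ∉ a →
    pvRunA p true (some fn) (a ++ '}' :: rest)
      = ("property", fn ++ String.ofList a) :: pvRunA (some '}') false none rest := by
  induction a with
  | nil =>
    intro p fn rest _
    simp [pvRunA]
  | cons x a' IH =>
    intro p fn rest hx
    have hx' : x ≠ '}' := fun h => hx (by simp [h])
    have hmem : '}' ∉ a' := fun h => hx (by simp [h])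
    simp only [List.cons_append, pvRunA, if_neg hx', Option.getD_some, ite_true]
    rw [IH (some x) (fn.push x) rest hmem]
    congr 2
    rw [← String.toList_inj]; simp

theorem pvRunA_noClose (l : List Char) : ∀ (p : Option Char) (fn : Option String),
    '}' ∉ l → pvRunA p true fn l = [] := by
  induction l with
  | nil => intro p fn _; simp [pvRunA]
  | cons x l' IH =>
    intro p fn hx
    have hx' : x ≠ '}' := fun h => hx (by simp [h])
    have hmem : '}' ∉ l' := fun h => hx (by simp [h])
    simp only [pvRunA, if_neg hx', ite_true]
    exact IH _ _ hmem

theorem pvRunA_step_skip (c : Char) (p : Option Char) (fn : Option String) (l : List Char)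
    (hc : c = '{' ∨ c = '}') (hh : l.head? = some c) :
    pvRunA p false fn (c :: l) = pvRunA (some c) false fn l := by
  have hslash : c ≠ '/' := by rcases hc with h | h <;> simp [h]
  simp only [pvRunA, Bool.false_eq_true, if_false]
  rw [if_neg hslash, if_pos ⟨hc, hh⟩]

theorem pvRunA_step_lit (c : Char) (fn : Option String) (l : List Char)
    (hc : c = '{' ∨ c = '}') (hh : l.head? ≠ some c) :
    pvRunA (some c) false fn (c :: l) = ("literal", c.toString) :: pvRunA (some c) false fn l := by
  have hslash : c ≠ '/' := by rcases hc with h | h <;> simp [h]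
  simp only [pvRunA, Bool.false_eq_true, if_false]
  rw [if_neg hslash, if_neg (fun h => hh h.2), if_neg (fun h => h.2 rfl), if_neg (fun h => h.2 rfl)]

theorem pvRunA_step_slash (p : Option Char) (fn : Option String) (l : List Char) :
    pvRunA p false fn ('/' :: l) = ("path separator", '/'.toString) :: pvRunA (some '/') false fn l := by
  simp [pvRunA]

theorem pvRunA_step_other (c : Char) (p : Option Char) (fn : Option String) (l : List Char)
    (h1 : c ≠ '/') (h2 : c ≠ '{') (h3 : c ≠ '}') :
    pvRunA p false fn (c :: l) = ("literal", c.toString) :: pvRunA (some c) false fn l := by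
  simp only [pvRunA, Bool.false_eq_true, if_false]
  rw [if_neg h1, if_neg (fun h => by rcases h.1 with h' | h' <;> [exact h2 h'; exact h3 h']),
    if_neg (fun h => h3 h.1), if_neg (fun h => h2 h.1)]

theorem pvRunA_step_open (p : Option Char) (fn : Option String) (l : List Char)
    (hh : l.head? ≠ some '{') (hp : p ≠ some '{') :
    pvRunA p false fn ('{' :: l) = pvRunA (some '{') true (some "") l := by
  simp [pvRunA, hh, hp]

theorem pvRunA_step_close_lit (fn : Option String) (l : List Char)
    (hh : l.head? ≠ some '}') :
    pvRunA (some '}') false fn ('}' :: l) = ("literal", '}'.toString) :: pvRunA (some '}') false fn l := by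
  simp [pvRunA, hh]

theorem pvRunA_step_close_raise (p : Option Char) (fn : Option String) (l : List Char)
    (hh : l.head? ≠ some '}') (hp : p ≠ some '}') :
    pvRunA p false fn ('}' :: l) = [] := by
  simp [pvRunA, hh, hp]

theorem pvRunA_run_aux (k : Nat) : ∀ (fn : Option String) (c : Char) (rest : List Char),
    (c = '{' ∨ c = '}') → 1 ≤ k → rest.head? ≠ some c →
    pvRunA (some c) false fn (List.replicate k c ++ rest)
      = ("literal", c.toString) :: pvRunA (some c) false fn rest := by
  induction k with
  | zero => intro fn c rest _ h _; omega
  | succ k IH =>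
    intro fn c rest hc _ hrest
    rw [List.replicate_succ, List.cons_append]
    cases k with
    | zero =>
      rw [List.replicate_zero, List.nil_append]
      exact pvRunA_step_lit c fn rest hc hrest
    | succ k' =>
      have hhead : (List.replicate (k' + 1) c ++ rest).head? = some c := by
        simp [List.replicate_succ]
      rw [pvRunA_step_skip c (some c) fn _ hc hhead]
      exact IH fn c rest hc (by omega) hrest

theorem pvRunA_run (k : Nat) (c : Char) (p : Option Char) (fn : Option String) (rest : List Char)
    (hc : c = '{' ∨ c = '}') (hk : 2 ≤ k) (hrest : rest.head? ≠ some c) :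
    pvRunA p false fn (List.replicate k c ++ rest)
      = ("literal", c.toString) :: pvRunA (some c) false fn rest := by
  obtain ⟨k', rfl⟩ : ∃ k', k = k' + 1 := ⟨k - 1, by omega⟩
  have hhead : (List.replicate k' c ++ rest).head? = some c := by
    cases k' with
    | zero => omega
    | succ _ => simp [List.replicate_succ]
  rw [List.replicate_succ, List.cons_append, pvRunA_step_skip c p fn _ hc hhead]
  exact pvRunA_run_aux k' fn c rest hc (by omega) hrest
theorem pvMain (s : List Char) : ∀ (m i : Nat), s.length - i = m → i ≤ s.length →
    (0 < i → ¬(s[i-1]? = some '{' ∧ s[i]? = some '{')) →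
    pvRunA (if i = 0 then none else s[i-1]?) false none (s.drop i) = pvLoopB s i := by
  intro m
  induction m using Nat.strong_induction_on with
  | _ m IH =>
    intro i hm hile hinv
    by_cases hi : i < s.length
    · have hdropi : s[i] :: s.drop (i+1) = s.drop i := List.getElem_cons_drop ..
      have hgi : s[i]? = some s[i] := List.getElem?_eq_getElem hi
      have hnext : (s.drop (i+1)).head? = s[i+1]? := List.head?_drop ..
      rw [pvLoopB, dif_pos hi]
      dsimp only
      by_cases hbrace : s[i] = '{' ∨ s[i] = '}'
      · -- brace case: run decomposition
        have htake : (s.drop i).takeWhile (fun d => d = s[i])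
            = List.replicate ((s.drop i).takeWhile (fun d => d = s[i])).length s[i] :=
          List.eq_replicate_iff.mpr ⟨rfl, fun b hb => by simpa using List.mem_takeWhile_imp hb⟩
        have hsplit : s.drop i
            = List.replicate ((s.drop i).takeWhile (fun d => d = s[i])).length s[i]
              ++ (s.drop i).dropWhile (fun d => d = s[i]) := by
          conv_lhs => rw [← List.takeWhile_append_dropWhile (p := fun d => d = s[i]) (l := s.drop i)]
          rw [← htake]
        have hrest : ((s.drop i).dropWhile (fun d => d = s[i])).head? ≠ some s[i] := by
          intro h
          have h2 := List.head?_dropWhile_not (fun d => d = s[i]) (s.drop i)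
          rw [h] at h2
          simp at h2
        have hrunle : ((s.drop i).takeWhile (fun d => d = s[i])).length ≤ s.length - i := by
          have h3 := (List.takeWhile_sublist (l := s.drop i) (fun d => d = s[i])).length_le
          simpa using h3
        have hrun1 : 1 ≤ ((s.drop i).takeWhile (fun d => d = s[i])).length := by
          by_contra h
          have h0 : (s.drop i).takeWhile (fun d => d = s[i]) = [] :=
            List.length_eq_zero_iff.mp (by omega)
          apply hrest
          have h1 : (s.drop i).dropWhile (fun d => d = s[i]) = s.drop i := by
            conv_rhs => rw [← List.takeWhile_append_dropWhile (p := fun d => d = s[i]) (l := s.drop i)]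
            rw [h0, List.nil_append]
          rw [h1, ← hdropi]
          simp
        have hrestdrop : (s.drop i).dropWhile (fun d => d = s[i])
            = s.drop (i + ((s.drop i).takeWhile (fun d => d = s[i])).length) := by
          have h5 := congrArg (List.drop ((s.drop i).takeWhile (fun d => d = s[i])).length) hsplit
          rw [List.drop_drop] at h5
          simp only [List.drop_append, List.drop_replicate, List.length_replicate, Nat.sub_self,
            List.drop_zero, List.replicate_zero, List.nil_append] at h5
          exact h5.symm
        have helem : ∀ j, j < ((s.drop i).takeWhile (fun d => d = s[i])).length →
            s[i + j]? = some s[i] := by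
          intro j hj
          rw [← List.getElem?_drop]
          conv_lhs => rw [hsplit]
          rw [List.getElem?_append_left (by simpa using hj)]
          simp [hj]
        by_cases hrun2 : 2 ≤ ((s.drop i).takeWhile (fun d => d = s[i])).length
        · -- collapsed run: one literal brace
          rw [if_pos hbrace, dif_pos hrun2]
          conv_lhs => rw [hsplit]
          rw [pvRunA_run _ _ _ _ _ hbrace hrun2 hrest]
          congr 1
          have hprev : s[i + ((s.drop i).takeWhile (fun d => d = s[i])).length - 1]? = some s[i] := by
            have := helem (((s.drop i).takeWhile (fun d => d = s[i])).length - 1) (by omega)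
            rwa [show i + (((s.drop i).takeWhile (fun d => d = s[i])).length - 1)
              = i + ((s.drop i).takeWhile (fun d => d = s[i])).length - 1 from by omega] at this
          have hIH := IH (s.length - (i + ((s.drop i).takeWhile (fun d => d = s[i])).length))
            (by omega) (i + ((s.drop i).takeWhile (fun d => d = s[i])).length) rfl (by omega)
            (by
              intro _
              rintro ⟨h1, h2⟩
              rcases hbrace with hb | hb
              · apply hrest
                rw [hrestdrop, List.head?_drop, h2, hb]
              · rw [h1] at hprev
                have h6 := Option.some.inj hprev
                rw [hb] at h6
                exact absurd h6 (by decide))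
          rw [if_neg (by omega), hprev] at hIH
          rw [← hrestdrop] at hIH
          exact hIH
        · -- single brace: field start or lone '}'
          have hlen1 : ((s.drop i).takeWhile (fun d => d = s[i])).length = 1 := by omega
          have hdw : (s.drop i).dropWhile (fun d => d = s[i]) = s.drop (i+1) := by
            rw [hrestdrop, hlen1]
          have hrest' : (s.drop (i+1)).head? ≠ some s[i] := by rw [← hdw]; exact hrest
          rw [if_pos hbrace, dif_neg hrun2]
          by_cases hopen : s[i] = '{'
          · -- field: scan to the closing '}'
            rw [if_pos hopen]
            have hp : (if i = 0 then none else s[i-1]?) ≠ some '{' := by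
              by_cases h0 : i = 0
              · simp [h0]
              · rw [if_neg h0]
                intro hcon
                exact hinv (by omega) ⟨hcon, by rw [hgi, hopen]⟩
            conv_lhs => rw [← hdropi]
            rw [hopen] at hrest' ⊢
            rw [pvRunA_step_open _ _ _ hrest' hp]
            rcases hfi : (s.drop (i+1)).findIdx? (fun d => d = '}') with _ | k
            · show _ = ([] : List (String × String))
              have hno : '}' ∉ s.drop (i+1) := by
                intro hmem
                have := List.findIdx?_eq_none_iff.mp hfi '}' hmem
                simp at this
              exact pvRunA_noClose _ _ _ hno
            · show _ = ("property", String.ofList ((s.drop (i+1)).take k)) :: pvLoopB s (i+1+k+1)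
              obtain ⟨hklt, hkel, hkbef⟩ := List.findIdx?_eq_some_iff_getElem.mp hfi
              have hkel' : (s.drop (i+1))[k] = '}' := by simpa using hkel
              have h7 : (s.drop (i+1)).drop k = '}' :: s.drop (i+1+k+1) := by
                rw [← List.getElem_cons_drop (as := s.drop (i+1)) (i := k) hklt, hkel',
                  List.drop_drop]
                congr 2
              have hdecomp : s.drop (i+1) = (s.drop (i+1)).take k ++ '}' :: s.drop (i+1+k+1) := by
                conv_lhs => rw [← List.take_append_drop k (s.drop (i+1))]
                rw [h7]
              have hnotin : '}' ∉ (s.drop (i+1)).take k := by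
                intro hmem
                obtain ⟨j, hj, hje⟩ := List.mem_take_iff_getElem.mp hmem
                exact hkbef j (by omega) (by simp [hje])
              rw [hdecomp, pvRunA_field _ _ _ _ hnotin]
              have h8 : s[i+1+k]? = some '}' := by
                rw [← List.getElem?_drop, List.getElem?_eq_getElem hklt, hkel']
              have hIH := IH (s.length - (i+1+k+1)) (by omega) (i+1+k+1) rfl
                (by have := List.length_drop (i := i+1) (l := s); omega)
                (by
                  intro _
                  rintro ⟨h1, h2⟩
                  rw [show i+1+k+1-1 = i+1+k from by omega, h8] at h1
                  exact absurd (Option.some.inj h1) (by decide))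
              rw [if_neg (by omega), show i+1+k+1-1 = i+1+k from by omega, h8] at hIH
              rw [hIH, String.empty_append]
              have h10 : (List.take k (s.drop (i+1)) ++ '}' :: s.drop (i+1+k+1)).take k
                  = List.take k (s.drop (i+1)) := by
                rw [List.take_append_of_le_length (by rw [List.length_take]; omega)]
                simp [List.take_take]
              rw [h10]
          · -- lone '}'
            have hb : s[i] = '}' := by rcases hbrace with h | h; exact absurd h hopen; exact h
            rw [if_neg hopen]
            conv_lhs => rw [← hdropi]
            rw [hb] at hrest' ⊢
            by_cases hpj : 0 < i ∧ s[i-1]? = some '}'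
            · rw [if_pos hpj]
              have hprev_eq : (if i = 0 then none else s[i-1]?) = some '}' := by
                rw [if_neg (by omega)]
                exact hpj.2
              rw [hprev_eq, pvRunA_step_close_lit _ _ hrest']
              have hIH := IH (s.length - (i+1)) (by omega) (i+1) rfl (by omega)
                (by
                  intro _
                  rintro ⟨h1, h2⟩
                  rw [show i + 1 - 1 = i from by omega, hgi] at h1
                  have h9 := Option.some.inj h1
                  rw [hb] at h9
                  exact absurd h9 (by decide))
              rw [if_neg (by omega), show i + 1 - 1 = i from by omega, hgi, hb] at hIH
              rw [hIH]
            · rw [if_neg hpj]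
              have hp2 : (if i = 0 then none else s[i-1]?) ≠ some '}' := by
                by_cases h0 : i = 0
                · simp [h0]
                · rw [if_neg h0]
                  intro hcon
                  exact hpj ⟨by omega, hcon⟩
              rw [pvRunA_step_close_raise _ _ _ hrest' hp2]
      · -- not a brace: '/' or ordinary literal
        rw [if_neg hbrace]
        obtain ⟨hnb1, hnb2⟩ := not_or.mp hbrace
        have hIH := IH (s.length - (i+1)) (by omega) (i+1) rfl (by omega)
          (by
            intro _
            rintro ⟨h1, h2⟩
            rw [show i + 1 - 1 = i from by omega, hgi] at h1
            exact hnb1 (Option.some.inj h1))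
        rw [if_neg (by omega), show i + 1 - 1 = i from by omega, hgi] at hIH
        by_cases hsl : s[i] = '/'
        · rw [if_pos hsl]
          conv_lhs => rw [← hdropi]
          rw [hsl] at hIH ⊢
          rw [pvRunA_step_slash, hIH]
        · rw [if_neg hsl]
          conv_lhs => rw [← hdropi]
          rw [pvRunA_step_other s[i] _ _ _ hsl hnb1 hnb2, hIH]
    · have : i = s.length := by omega
      subst this
      rw [pvLoopB]
      simp [pvRunA, List.drop_length]

-- ===== VERDICT (by name: the statement is the Claim_ definition above) =====
theorem tokenize_pattern_py_spec : Claim_equal_tokenize_pattern_py := by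
  intro pattern _dom _pre
  unfold Spec_tokenize_pattern_py tokenize_pattern_py tokenize_pattern_py_alt
  have h2 := pvMain pattern.toList pattern.toList.length 0 rfl (by omega) (by omega)
  rw [if_pos rfl, List.drop_zero] at h2
  exact (pvLoopA_eq_runA pattern.toList none false none).trans h2
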